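-- pv_equiv track=rewrite | github.com/princeton-nlp/LitSearch | utils/utils.py | get_clean_paragraph_indices
-- ===== SOURCE A (Python) =====
-- from typing import List, Any, Tuple
--
-- def get_clean_full_paper(item: dict) -> str:
--     return item['full_paper']
--
-- def get_clean_paragraph_indices(item: dict) -> List[Tuple[int, int]]:
--     text = get_clean_full_paper(item)
--     paragraph_indices = []
--     paragraph_start = 0
--     paragraph_end = 0
--     while paragraph_start < len(text):
--         paragraph_end = text.find("\n\n", paragraph_start)
--         if paragraph_end == -1:
--             paragraph_end = len(text)
--         paragraph_indices.append((paragraph_start, paragraph_end))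
--         paragraph_start = paragraph_end + 2
--     return paragraph_indices
-- ===== SOURCE B (Python) =====
-- from typing import List, Tuple
--
-- def get_clean_paragraph_indices(item: dict) -> List[Tuple[int, int]]:
--     parts = item['full_paper'].split("\n\n")
--     if parts[-1] == "":
--         parts = parts[:-1]
--     indices = []
--     start = 0
--     for part in parts:
--         end = start + len(part)
--         indices.append((start, end))
--         start = end + 2
--     return indices
-- ===== Notes on version B (the rewrite author's own statement) =====
-- stated objective: faster
-- what changed: Replaces A's index-chasing while loop of repeated text.find('\n\n', start) calls with a single text.split('\n\n') (dropping one trailing empty segment) and a pass that derives each (start, end) from the accumulated part lengths.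
import Mathlib
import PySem

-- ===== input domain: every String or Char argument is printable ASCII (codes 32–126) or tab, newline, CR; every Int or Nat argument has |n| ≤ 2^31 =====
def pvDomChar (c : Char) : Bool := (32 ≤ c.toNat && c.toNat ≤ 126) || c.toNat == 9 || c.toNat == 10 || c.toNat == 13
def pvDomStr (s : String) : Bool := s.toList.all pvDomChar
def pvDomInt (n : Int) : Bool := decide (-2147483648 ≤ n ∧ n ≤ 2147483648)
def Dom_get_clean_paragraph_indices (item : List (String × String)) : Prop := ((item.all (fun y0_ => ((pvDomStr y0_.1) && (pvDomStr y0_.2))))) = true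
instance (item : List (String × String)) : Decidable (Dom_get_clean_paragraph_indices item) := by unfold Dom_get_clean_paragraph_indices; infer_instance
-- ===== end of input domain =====

-- B replaces A's index-chasing find loop by one split("\n\n") followed by a
-- length-accumulating pass over the parts (same return value on every dict with the key).

-- ===== PORT A =====
-- one loop iteration's paragraph_end: text.find("\n\n", start), with -1 fixed up to len(text)
def paraEndA (text : List Char) (start : Nat) : Int :=
  let e0 := PySem.Chars.findFrom text ['\n', '\n'] (start : Int)
  if e0 = -1 then (text.length : Int) else e0

lemma paraEndA_ge (text : List Char) (start : Nat) (h : start ≤ text.length) :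
    (start : Int) ≤ paraEndA text start := by
  unfold paraEndA
  by_cases h0 : PySem.Chars.findFrom text ['\n', '\n'] (start : Int) = -1
  · simp only [h0]; norm_num; exact_mod_cast h
  · simp only [if_neg h0]
    exact (PySem.Chars.findFrom_natCast_spec text ['\n', '\n'] start h h0).1


-- the while loop of A; paragraph_start is kept as a Nat (in Python it starts at 0 and only grows)
def goA (text : List Char) (start : Nat) : List (Int × Int) :=
  if h : start < text.length then
    ((start : Int), paraEndA text start) :: goA text ((paraEndA text start).toNat + 2)
  else []
termination_by text.length - start
decreasing_by
  have := paraEndA_ge text start (le_of_lt h)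
  omega


def get_clean_paragraph_indices (item : List (String × String)) : List (Int × Int) :=
  match List.lookup "full_paper" item with
  | none => []          -- Python raises KeyError here: excluded by Pre_
  | some text => goA text.toList 0

-- ===== PORT B =====
-- the for loop of B: a running start offset over the materialized parts
def goB (parts : List (List Char)) (start : Int) : List (Int × Int) :=
  match parts with
  | [] => []
  | p :: ps => (start, start + (p.length : Int)) :: goB ps (start + (p.length : Int) + 2)


def get_clean_paragraph_indices_alt (item : List (String × String)) : List (Int × Int) :=
  match List.lookup "full_paper" item with
  | none => []          -- Python raises KeyError here: excluded by Pre_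
  | some text =>
    let parts0 := PySem.Chars.splitOn text.toList ['\n', '\n']
    let parts := if PySem.List.pyGet? parts0 (-1) = some [] then parts0.dropLast else parts0
    goB parts 0

-- ===== PRECONDITION & SPEC =====
-- Pre_ excludes exactly the dicts without the key 'full_paper', on which A raises KeyError.
def Pre_get_clean_paragraph_indices (item : List (String × String)) : Prop :=
  (List.lookup "full_paper" item).isSome = true
instance (item : List (String × String)) : Decidable (Pre_get_clean_paragraph_indices item) := by unfold Pre_get_clean_paragraph_indices; infer_instance

def pvWitness_get_clean_paragraph_indices : (List (String × String)) := [("full_paper", "ab\n\ncd")]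

def Spec_get_clean_paragraph_indices (item : List (String × String)) (out : List (Int × Int)) : Prop := out = get_clean_paragraph_indices_alt item
instance (item : List (String × String)) (out : List (Int × Int)) : Decidable (Spec_get_clean_paragraph_indices item out) := by unfold Spec_get_clean_paragraph_indices; infer_instance

-- ===== CLAIM (what is proved, stated in full; the proofs are below) =====
def Claim_equal_get_clean_paragraph_indices : Prop := ∀ (item : List (String × String)), Dom_get_clean_paragraph_indices item → Pre_get_clean_paragraph_indices item → Spec_get_clean_paragraph_indices item (get_clean_paragraph_indices item)

-- ===== LEMMAS AND PROOFS =====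

-- reference split of the text on "\n\n": first-occurrence recursion (the shape both ports reduce to)
def sp (l : List Char) : List (List Char) :=
  if h : PySem.Chars.find l ['\n', '\n'] = -1 then [l]
  else
    l.take (PySem.Chars.find l ['\n', '\n']).toNat ::
      sp (l.drop ((PySem.Chars.find l ['\n', '\n']).toNat + 2))
termination_by l.length
decreasing_by
  have hinf : ['\n', '\n'] <:+: l := (PySem.Chars.find_ne_neg_one_iff l ['\n', '\n']).mp h
  have hne : l ≠ [] := by rintro rfl; simpa using hinf.length_le
  have : 0 < l.length := List.length_pos_iff.mpr hne
  simp only [List.length_drop]; omega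

lemma sp_ne_nil (l : List Char) : sp l ≠ [] := by rw [sp]; split <;> simp

lemma sp_neg (l : List Char) (h : PySem.Chars.find l ['\n', '\n'] = -1) : sp l = [l] := by
  rw [sp, dif_pos h]

lemma sp_pos (l : List Char) (h : PySem.Chars.find l ['\n', '\n'] ≠ -1) :
    sp l = l.take (PySem.Chars.find l ['\n', '\n']).toNat ::
      sp (l.drop ((PySem.Chars.find l ['\n', '\n']).toNat + 2)) := by
  rw [sp, dif_neg h]

lemma go_nil (sub : List Char) (k : Nat) :
    PySem.Chars.find.go sub [] k = if sub.isEmpty then (k : Int) else -1 := by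
  rw [PySem.Chars.find.go]

lemma go_cons (sub : List Char) (c : Char) (t : List Char) (k : Nat) :
    PySem.Chars.find.go sub (c :: t) k =
      if sub.isPrefixOf (c :: t) then (k : Int) else PySem.Chars.find.go sub t (k + 1) := by
  rw [PySem.Chars.find.go]

lemma find_go_shift (sub : List Char) : ∀ (l : List Char) (k : Nat),
    PySem.Chars.find.go sub l k =
      (if PySem.Chars.find.go sub l 0 = -1 then -1 else PySem.Chars.find.go sub l 0 + k) := by
  intro l
  induction l with
  | nil =>
    intro k
    rw [go_nil, go_nil]
    split_ifs <;> simp_all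
  | cons c t ih =>
    intro k
    have hb : (-1 : Int) ≤ PySem.Chars.find.go sub t 0 := PySem.Chars.neg_one_le_find t sub
    rw [go_cons, go_cons]
    by_cases hp : sub.isPrefixOf (c :: t)
    · simp [hp]
    · simp only [hp, Bool.false_eq_true, if_false]
      rw [ih (k + 1), ih (0 + 1)]
      split_ifs <;> push_cast <;> omega

lemma find_cons_prefix (l : List Char) (hp : (['\n', '\n'] : List Char).isPrefixOf l) :
    PySem.Chars.find l ['\n', '\n'] = 0 := by
  cases l with
  | nil => simp [List.isPrefixOf] at hp
  | cons c t => simp only [PySem.Chars.find]; rw [go_cons, if_pos hp]; rfl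

lemma find_cons_shift (c : Char) (t : List Char)
    (hp : ¬ (['\n', '\n'] : List Char).isPrefixOf (c :: t)) :
    PySem.Chars.find (c :: t) ['\n', '\n'] =
      (if PySem.Chars.find t ['\n', '\n'] = -1 then -1
       else PySem.Chars.find t ['\n', '\n'] + 1) := by
  simp only [PySem.Chars.find]
  rw [go_cons, if_neg (by simpa using hp), find_go_shift]
  norm_num

def hcons (p : List Char) : List (List Char) → List (List Char)
  | [] => [p]
  | h :: t => (p ++ h) :: t

lemma sgo_nil (m : Nat) (cur : List Char) (acc : List (List Char)) :
    PySem.Chars.splitOn.go ['\n','\n'] (m+1) [] cur acc = (cur.reverse :: acc).reverse := by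
  rw [PySem.Chars.splitOn.go]; omega

lemma sgo_cons (m : Nat) (c : Char) (rest cur : List Char) (acc : List (List Char)) :
    PySem.Chars.splitOn.go ['\n','\n'] (m+1) (c :: rest) cur acc =
      if (['\n','\n'] : List Char).isPrefixOf (c :: rest)
      then PySem.Chars.splitOn.go ['\n','\n'] m (List.drop 2 (c :: rest)) [] (cur.reverse :: acc)
      else PySem.Chars.splitOn.go ['\n','\n'] m rest (c :: cur) acc := by
  rw [PySem.Chars.splitOn.go]; rfl

lemma splitOn_go_sp : ∀ (fuel : Nat) (l cur : List Char) (acc : List (List Char)),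
    l.length < fuel →
    PySem.Chars.splitOn.go ['\n', '\n'] fuel l cur acc =
      acc.reverse ++ hcons cur.reverse (sp l) := by
  intro fuel
  induction fuel with
  | zero => intro l cur acc h; omega
  | succ m ih =>
    intro l cur acc h
    cases l with
    | nil =>
      rw [sgo_nil, sp_neg _ (by decide)]
      simp [hcons]
    | cons c rest =>
      rw [sgo_cons]
      by_cases hp : (['\n', '\n'] : List Char).isPrefixOf (c :: rest)
      · rw [if_pos hp]
        have hlen : (List.drop 2 (c :: rest)).length < m := by simp at h ⊢; omega
        rw [ih _ _ _ hlen]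
        have hf : PySem.Chars.find (c :: rest) ['\n', '\n'] = 0 := find_cons_prefix _ hp
        have hne0 : PySem.Chars.find (c :: rest) ['\n', '\n'] ≠ -1 := by rw [hf]; decide
        conv_rhs => rw [sp_pos _ hne0]
        rw [hf]
        have hs := sp_ne_nil (List.drop ((0 : Int).toNat + 2) (c :: rest))
        simp only [Int.toNat_zero, List.take_zero]
        cases hsp : sp (List.drop (0 + 2) (c :: rest)) with
        | nil => exact absurd (by simpa using hsp) hs
        | cons a b => simp [hcons]
      · rw [if_neg hp]
        have hlen : rest.length < m := by simp at h; omega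
        rw [ih _ _ _ hlen]
        have hshift := find_cons_shift c rest hp
        by_cases h0 : PySem.Chars.find rest ['\n', '\n'] = -1
        · have hf : PySem.Chars.find (c :: rest) ['\n', '\n'] = -1 := by rw [hshift, if_pos h0]
          rw [sp_neg _ h0, sp_neg _ hf]
          simp [hcons]
        · have hge : 0 ≤ PySem.Chars.find rest ['\n', '\n'] := by
            have := PySem.Chars.neg_one_le_find rest ['\n', '\n']; omega
          have hf : PySem.Chars.find (c :: rest) ['\n', '\n'] =
              PySem.Chars.find rest ['\n', '\n'] + 1 := by rw [hshift, if_neg h0]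
          have hne0 : PySem.Chars.find (c :: rest) ['\n', '\n'] ≠ -1 := by rw [hf]; omega
          conv_lhs => rw [sp_pos _ h0]
          conv_rhs => rw [sp_pos _ hne0]
          rw [hf]
          have ht : (PySem.Chars.find rest ['\n', '\n'] + 1).toNat =
              (PySem.Chars.find rest ['\n', '\n']).toNat + 1 := by omega
          rw [ht]
          simp [hcons, List.drop_succ_cons, List.take_succ_cons]

lemma splitOn_eq_sp (l : List Char) :
    PySem.Chars.splitOn l ['\n', '\n'] = sp l := by
  rw [PySem.Chars.splitOn, splitOn_go_sp (l.length + 1) l [] [] (by omega)]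
  cases hsp : sp l with
  | nil => exact absurd hsp (sp_ne_nil l)
  | cons a b => simp [hcons]

def trimB (parts : List (List Char)) : List (List Char) :=
  if PySem.List.pyGet? parts (-1) = some [] then parts.dropLast else parts

lemma pyGet_neg_one_cons (a : List Char) (l : List (List Char)) (h : l ≠ []) :
    PySem.List.pyGet? (a :: l) (-1) = PySem.List.pyGet? l (-1) := by
  have hl : 0 < l.length := List.length_pos_iff.mpr h
  simp only [PySem.List.pyGet?, PySem.List.pyIdx?]
  norm_num
  rw [if_pos (by omega), Option.bind_some, List.getElem?_eq_getElem (by omega)]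
  congr 1
  rw [List.getElem_cons]
  simp [Nat.pos_iff_ne_zero.mp hl]

lemma trimB_cons (a : List Char) (l : List (List Char)) (h : l ≠ []) :
    trimB (a :: l) = a :: trimB l := by
  unfold trimB
  rw [pyGet_neg_one_cons a l h]
  split_ifs with h1
  · simp [List.dropLast_cons_of_ne_nil h]
  · rfl

lemma pyGet_singleton (t : List Char) : PySem.List.pyGet? [t] (-1) = some t := by
  simp [PySem.List.pyGet?, PySem.List.pyIdx?]

lemma trimB_singleton (t : List Char) (h : t ≠ []) : trimB [t] = [t] := by
  unfold trimB
  rw [pyGet_singleton, if_neg (by simpa using h)]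

lemma mainA (text : List Char) (k : Nat) (hk : k ≤ text.length) :
    goA text k = goB (trimB (sp (List.drop k text))) (k : Int) := by
  have hFF := PySem.Chars.findFrom_natCast text ['\n', '\n'] k hk
  by_cases h : k < text.length
  · have htne : List.drop k text ≠ [] := by
      intro he
      have := congrArg List.length he
      simp at this; omega
    by_cases hf : PySem.Chars.find (List.drop k text) ['\n', '\n'] = -1
    · -- no further separator: single final paragraph
      have hffn : PySem.Chars.findFrom text ['\n', '\n'] (k : Int) = -1 := by
        rw [hFF, if_pos hf]
      have hpe : paraEndA text k = (text.length : Int) := by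
        unfold paraEndA
        simp only [hffn]
        simp
      rw [goA, dif_pos h, hpe]
      rw [goA, dif_neg (by omega)]
      rw [sp_neg _ hf, trimB_singleton _ htne]
      have hlen' : ((text.length - k : Nat) : Int) = (text.length : Int) - k := by omega
      simp only [goB, List.length_drop, hlen', List.cons.injEq, Prod.mk.injEq]
      refine ⟨⟨trivial, by ring⟩, trivial⟩
    · -- separator at offset n from k
      have hge : 0 ≤ PySem.Chars.find (List.drop k text) ['\n', '\n'] := by
        have := PySem.Chars.neg_one_le_find (List.drop k text) ['\n', '\n']; omega
      set n := (PySem.Chars.find (List.drop k text) ['\n', '\n']).toNat with hn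
      have hfn : PySem.Chars.find (List.drop k text) ['\n', '\n'] = (n : Int) := by
        rw [hn, Int.toNat_of_nonneg hge]
      have hpref : ['\n', '\n'] <+: List.drop n (List.drop k text) :=
        (PySem.Chars.find_spec hge).1
      have hlen2 : n + 2 ≤ (List.drop k text).length := by
        have h2 : 2 ≤ (List.drop n (List.drop k text)).length := by
          simpa using hpref.length_le
        simp only [List.length_drop] at h2 ⊢
        have hle := PySem.Chars.find_le_length (List.drop k text) ['\n', '\n']
        simp only [List.length_drop] at hle
        omega
      have hk2 : k + n + 2 ≤ text.length := by
        simp only [List.length_drop] at hlen2; omega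
      have hffn : PySem.Chars.findFrom text ['\n', '\n'] (k : Int) = (k : Int) + n := by
        rw [hFF, if_neg hf, hfn]
      have hpe : paraEndA text k = (k : Int) + n := by
        unfold paraEndA
        simp only [hffn]
        rw [if_neg (by omega)]
      have htn : ((k : Int) + n).toNat = k + n := by omega
      rw [goA, dif_pos h, hpe, htn]
      have ih := mainA text (k + n + 2) hk2
      rw [sp_pos _ hf, hfn]
      have hdrop : List.drop ((n : Int).toNat + 2) (List.drop k text) = List.drop (k + n + 2) text := by
        have h3 : k + ((n : Int).toNat + 2) = k + n + 2 := by omega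
        rw [List.drop_drop, h3]
      rw [hdrop]
      rw [trimB_cons _ _ (sp_ne_nil _)]
      unfold goB
      have htake : (List.take (n : Int).toNat (List.drop k text)).length = n := by
        simp only [List.length_take, List.length_drop]
        omega
      rw [htake]
      have hcast : ((k + n + 2 : Nat) : Int) = (k : Int) + n + 2 := by push_cast; ring
      rw [hcast] at ih
      rw [ih]
  · have hke : k = text.length := by omega
    rw [goA, dif_neg (by omega)]
    subst hke
    rw [List.drop_length, sp_neg _ (by decide)]
    unfold trimB
    rw [pyGet_singleton, if_pos rfl]
    rfl
termination_by text.length - k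
decreasing_by omega

-- ===== VERDICT (by name: the statement is the Claim_ definition above) =====
theorem get_clean_paragraph_indices_spec : Claim_equal_get_clean_paragraph_indices := by
  intro item hdom hpre
  unfold Spec_get_clean_paragraph_indices get_clean_paragraph_indices get_clean_paragraph_indices_alt
  unfold Pre_get_clean_paragraph_indices at hpre
  cases hl : List.lookup "full_paper" item with
  | none => rw [hl] at hpre
  | some text =>
    simp only []
    rw [splitOn_eq_sp]
    have h := mainA text.toList 0 (Nat.zero_le _)
    rw [List.drop_zero] at h
    simpa [trimB] using h
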